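-- pv_equiv track=rewrite | github.com/foundation29org/dxgpt-bench-lab | bench/pipelines/pipeline_v4 - fork/main/evaluator.py | _evaluate_snomed_match
-- ===== SOURCE A (Python) =====
-- from typing import Dict, List, Any, Tuple, Optional
--
-- def _evaluate_snomed_match(gdx_name: str, gdx_info: Dict, ddx_list: List) -> Dict:
--     """SNOMED evaluation with detailed trace"""
--     gdx_snomed_codes = gdx_info.get("medical_codes", {}).get("snomed", [])
--
--     if not gdx_snomed_codes:
--         return {"status": "SKIPPED", "details": "GDX has no SNOMED codes"}
--
--     for position, (ddx_name, ddx_info) in enumerate(ddx_list, 1):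
--         ddx_snomed_codes = ddx_info.get("medical_codes", {}).get("snomed", [])
--
--         for gdx_code in gdx_snomed_codes:
--             if gdx_code in ddx_snomed_codes:
--                 return {
--                     "status": "SUCCESS",
--                     "details": f"SUCCESS: Found match with DDX at P{position} (code: {gdx_code})"
--                 }
--
--     return {
--         "status": "FAILED",
--         "details": f"FAILED: No SNOMED code from GDX list {gdx_snomed_codes} found in any DDX"
--     }
-- ===== SOURCE B (Python) =====
-- def _evaluate_snomed_match(gdx_name: str, gdx_info: dict, ddx_list: list) -> dict:
--     """SNOMED evaluation: index each code's earliest DDX position, then one pass over GDX codes."""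
--     gdx_snomed_codes = gdx_info.get("medical_codes", {}).get("snomed", [])
--
--     if not gdx_snomed_codes:
--         return {"status": "SKIPPED", "details": "GDX has no SNOMED codes"}
--
--     index = {}
--     for position, (ddx_name, ddx_info) in enumerate(ddx_list, 1):
--         for code in ddx_info.get("medical_codes", {}).get("snomed", []):
--             index.setdefault(code, position)
--
--     best_position = None
--     best_code = None
--     for gdx_code in gdx_snomed_codes:
--         position = index.get(gdx_code)
--         if position is not None and (best_position is None or position < best_position):
--             best_position = position
--             best_code = gdx_code
--
--     if best_position is not None:
--         return {
--             "status": "SUCCESS",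
--             "details": f"SUCCESS: Found match with DDX at P{best_position} (code: {best_code})"
--         }
--
--     return {
--         "status": "FAILED",
--         "details": f"FAILED: No SNOMED code from GDX list {gdx_snomed_codes} found in any DDX"
--     }
-- ===== Notes on version B (the rewrite author's own statement) =====
-- stated objective: alternative
-- what changed: Replaces A's nested scan (for each DDX position, scan all GDX codes) by building a code-to-earliest-position index over ddx_list once, then a single pass over the GDX codes keeping the strictly smallest position (first GDX-order code among ties), so each code is examined once instead of the GDX list being rescanned per DDX.
import Mathlib
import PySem

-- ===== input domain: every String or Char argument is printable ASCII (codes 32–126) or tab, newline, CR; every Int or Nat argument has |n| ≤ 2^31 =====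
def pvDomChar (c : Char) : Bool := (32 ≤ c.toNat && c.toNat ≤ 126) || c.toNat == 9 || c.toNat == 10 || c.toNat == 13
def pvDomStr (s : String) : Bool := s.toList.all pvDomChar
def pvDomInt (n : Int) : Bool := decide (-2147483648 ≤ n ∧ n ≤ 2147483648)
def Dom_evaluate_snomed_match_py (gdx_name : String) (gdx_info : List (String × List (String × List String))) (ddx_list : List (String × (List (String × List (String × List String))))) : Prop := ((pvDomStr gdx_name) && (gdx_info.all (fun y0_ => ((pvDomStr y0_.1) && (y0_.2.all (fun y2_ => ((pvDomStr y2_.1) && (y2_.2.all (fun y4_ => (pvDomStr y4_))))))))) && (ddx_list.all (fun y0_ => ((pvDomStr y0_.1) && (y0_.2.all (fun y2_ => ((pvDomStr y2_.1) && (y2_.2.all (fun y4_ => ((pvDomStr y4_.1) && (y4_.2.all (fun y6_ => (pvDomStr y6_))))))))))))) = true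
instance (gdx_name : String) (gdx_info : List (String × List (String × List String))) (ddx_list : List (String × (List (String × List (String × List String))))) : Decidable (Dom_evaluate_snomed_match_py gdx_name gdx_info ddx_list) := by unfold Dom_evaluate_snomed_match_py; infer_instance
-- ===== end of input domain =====

-- B replaces A's per-position rescan of the GDX codes by a one-shot code→earliest-position
-- index over ddx_list plus a single min-keeping pass over the GDX codes (objective: alternative).

-- shared formatting helpers: Python's repr of a str / of a list[str] (exact on the printable-ASCII+tab/LF/CR domain)
def pyReprCharEsc (q : Char) (c : Char) : List Char :=
  if c = '\\' then ['\\', '\\']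
  else if c = '\t' then ['\\', 't']
  else if c = '\n' then ['\\', 'n']
  else if c = '\r' then ['\\', 'r']
  else if c = q then ['\\', q]
  else [c]

def pyReprStr (s : String) : String :=
  let q := if s.toList.contains '\'' && !(s.toList.contains '"') then '"' else '\''
  String.ofList ([q] ++ s.toList.flatMap (pyReprCharEsc q) ++ [q])

def pyReprStrList (xs : List String) : String :=
  "[" ++ String.intercalate ", " (xs.map pyReprStr) ++ "]"

-- shared: ddx_info.get("medical_codes", {}).get("snomed", []) (both Pythons use this very chain)
def getSnomed (info : List (String × List (String × List String))) : List String :=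
  (PySem.Dict.mk ((PySem.Dict.mk info).getD "medical_codes" [])).getD "snomed" []

def mkSkipped : List (String × String) :=
  [("status", "SKIPPED"), ("details", "GDX has no SNOMED codes")]

def mkSuccess (pos : Int) (code : String) : List (String × String) :=
  [("status", "SUCCESS"),
   ("details", "SUCCESS: Found match with DDX at P" ++ PySem.Int.toStr pos ++ " (code: " ++ code ++ ")")]

def mkFailed (gdx : List String) : List (String × String) :=
  [("status", "FAILED"),
   ("details", "FAILED: No SNOMED code from GDX list " ++ pyReprStrList gdx ++ " found in any DDX")]

-- ===== PORT A =====
-- A's outer loop: per DDX position, scan the GDX codes for membership; return on first hit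
def snomedLoopA (gdx : List String) (ddx : List (String × (List (String × List (String × List String))))) (pos : Int) : List (String × String) :=
  match ddx with
  | [] => mkFailed gdx
  | (_, info) :: rest =>
    let codes := getSnomed info
    match gdx.find? (fun c => codes.contains c) with
    | some c => mkSuccess pos c
    | none => snomedLoopA gdx rest (pos + 1)

def evaluate_snomed_match_py (gdx_name : String) (gdx_info : List (String × List (String × List String))) (ddx_list : List (String × (List (String × List (String × List String))))) : List (String × String) :=
  let gdx := getSnomed gdx_info
  if gdx.isEmpty then mkSkipped
  else snomedLoopA gdx ddx_list 1

-- ===== PORT B =====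
-- B: build the earliest-position index with setdefault over enumerate(ddx_list, 1)
def buildIndex (ddx : List (String × (List (String × List (String × List String))))) : PySem.Dict String Int :=
  (PySem.List.enumerate ddx 1).foldl
    (fun d p => (getSnomed p.2.2).foldl (fun d' c => d'.setdefault c p.1) d)
    PySem.Dict.empty

-- B: single pass over the GDX codes keeping the strictly smallest indexed position
def bestFold (idx : PySem.Dict String Int) (gdx : List String) : Option (Int × String) :=
  gdx.foldl
    (fun b c =>
      match idx.get? c with
      | some p =>
        match b with
        | none => some (p, c)
        | some (bp, bc) => if p < bp then some (p, c) else some (bp, bc)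
      | none => b)
    none

def evaluate_snomed_match_py_alt (gdx_name : String) (gdx_info : List (String × List (String × List String))) (ddx_list : List (String × (List (String × List (String × List String))))) : List (String × String) :=
  let gdx := getSnomed gdx_info
  if gdx.isEmpty then mkSkipped
  else
    match bestFold (buildIndex ddx_list) gdx with
    | some (p, c) => mkSuccess p c
    | none => mkFailed gdx

-- ===== PRECONDITION & SPEC =====
def Spec_evaluate_snomed_match_py (gdx_name : String) (gdx_info : List (String × List (String × List String))) (ddx_list : List (String × (List (String × List (String × List String))))) (out : List (String × String)) : Prop := out = evaluate_snomed_match_py_alt gdx_name gdx_info ddx_list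
instance (gdx_name : String) (gdx_info : List (String × List (String × List String))) (ddx_list : List (String × (List (String × List (String × List String))))) (out : List (String × String)) : Decidable (Spec_evaluate_snomed_match_py gdx_name gdx_info ddx_list out) := by unfold Spec_evaluate_snomed_match_py; infer_instance

-- ===== CLAIM (what is proved, stated in full; the proofs are below) =====
def Claim_equal_evaluate_snomed_match_py : Prop := ∀ (gdx_name : String) (gdx_info : List (String × List (String × List String))) (ddx_list : List (String × (List (String × List (String × List String))))), Dom_evaluate_snomed_match_py gdx_name gdx_info ddx_list → Spec_evaluate_snomed_match_py gdx_name gdx_info ddx_list (evaluate_snomed_match_py gdx_name gdx_info ddx_list)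

-- ===== LEMMAS AND PROOFS =====

-- earliest DDX position (≥ i) whose snomed list contains c: the value buildIndex records
def firstPos (ddx : List (String × (List (String × List (String × List String))))) (i : Int) (c : String) : Option Int :=
  match ddx with
  | [] => none
  | (_, info) :: rest => if c ∈ getSnomed info then some i else firstPos rest (i + 1) c

theorem firstPos_ge (ddx : List (String × (List (String × List (String × List String))))) (i p : Int) (c : String)
    (h : firstPos ddx i c = some p) : i ≤ p := by
  induction ddx generalizing i with
  | nil => simp [firstPos] at h
  | cons d rest ih =>
    simp only [firstPos] at h
    split at h
    · injection h with h'; omega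
    · have := ih (i + 1) h; omega

theorem inner_get (codes : List String) (p : Int) (d : PySem.Dict String Int) (c : String) :
    (codes.foldl (fun d' c' => d'.setdefault c' p) d).get? c =
      (match d.get? c with
       | some v => some v
       | none => if c ∈ codes then some p else none) := by
  induction codes generalizing d with
  | nil => cases h : d.get? c <;> simp [h]
  | cons x xs ih =>
    simp only [List.foldl_cons]
    rw [ih]
    by_cases hx : x = c
    · subst hx
      rw [PySem.Dict.get?_setdefault_self]
      cases h : d.get? x <;> simp [h]
    · have hx' : ¬ c = x := fun he => hx he.symm
      rw [PySem.Dict.get?_setdefault_of_ne d p hx']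
      cases h : d.get? c <;> simp [h, hx']

theorem buildIdx_get (ddx : List (String × (List (String × List (String × List String))))) (i : Int) (d : PySem.Dict String Int) (c : String) :
    ((PySem.List.enumerate ddx i).foldl
        (fun d p => (getSnomed p.2.2).foldl (fun d' c' => d'.setdefault c' p.1) d) d).get? c =
      (match d.get? c with
       | some v => some v
       | none => firstPos ddx i c) := by
  induction ddx generalizing i d with
  | nil => cases h : d.get? c <;> simp [PySem.List.enumerate_nil, firstPos, h]
  | cons x rest ih =>
    rw [PySem.List.enumerate_cons]
    simp only [List.foldl_cons]
    rw [ih, inner_get]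
    cases h : d.get? c
    · simp only [h, firstPos]
      by_cases hc : c ∈ getSnomed x.2 <;> simp [hc]
    · simp [h]

theorem buildIndex_get (ddx : List (String × (List (String × List (String × List String))))) (c : String) :
    (buildIndex ddx).get? c = firstPos ddx 1 c := by
  unfold buildIndex
  rw [buildIdx_get]
  rfl

-- non-accumulator form of B's min pass
def recBest (f : String → Option Int) : List String → Option (Int × String)
  | [] => none
  | c :: rest =>
    match f c, recBest f rest with
    | none, r => r
    | some p, none => some (p, c)
    | some p, some (q, c') => if p ≤ q then some (p, c) else some (q, c')

theorem recBest_mem (f : String → Option Int) (l : List String) (q : Int) (c' : String)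
    (h : recBest f l = some (q, c')) : f c' = some q := by
  induction l with
  | nil => simp [recBest] at h
  | cons x xs ih =>
    cases hx : f x with
    | none =>
      have h' : recBest f xs = some (q, c') := by simpa [recBest, hx] using h
      exact ih h'
    | some p =>
      cases hr : recBest f xs with
      | none =>
        have h' : p = q ∧ x = c' := by simpa [recBest, hx, hr] using h
        obtain ⟨h1, h2⟩ := h'
        subst h1; subst h2
        exact hx
      | some r =>
        obtain ⟨rq, rc⟩ := r
        have h' : (if p ≤ rq then some (p, x) else some (rq, rc)) = some (q, c') := by
          simpa [recBest, hx, hr] using h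
        by_cases hpq : p ≤ rq
        · rw [if_pos hpq] at h'
          simp only [Option.some.injEq, Prod.mk.injEq] at h'
          obtain ⟨h1, h2⟩ := h'
          subst h1; subst h2
          exact hx
        · rw [if_neg hpq] at h'
          simp only [Option.some.injEq, Prod.mk.injEq] at h'
          obtain ⟨h1, h2⟩ := h'
          subst h1; subst h2
          exact ih hr

theorem foldl_recBest (f : String → Option Int) (l : List String) (b : Option (Int × String)) :
    l.foldl
        (fun b c =>
          match f c with
          | some p =>
            match b with
            | none => some (p, c)
            | some (bp, bc) => if p < bp then some (p, c) else some (bp, bc)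
          | none => b)
        b =
      (match b, recBest f l with
       | none, r => r
       | some bb, none => some bb
       | some (bp, bc), some (q, c') => if q < bp then some (q, c') else some (bp, bc)) := by
  induction l generalizing b with
  | nil =>
    cases b with
    | none => simp [recBest]
    | some bb => obtain ⟨bp, bc⟩ := bb; simp [recBest]
  | cons x xs ih =>
    simp only [List.foldl_cons]
    rw [ih]
    cases hx : f x with
    | none =>
      cases b with
      | none => simp only [recBest, hx]
      | some bb => obtain ⟨bp, bc⟩ := bb; simp only [recBest, hx]
    | some p =>
      cases b with
      | none =>
        cases hr : recBest f xs with
        | none => simp only [recBest, hx, hr]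
        | some r =>
          obtain ⟨q, c'⟩ := r
          by_cases h2 : p ≤ q
          · simp only [recBest, hx, hr]
            simp [h2, show ¬ q < p by omega]
          · simp only [recBest, hx, hr]
            simp [h2, show q < p by omega]
      | some bb =>
        obtain ⟨bp, bc⟩ := bb
        cases hr : recBest f xs with
        | none =>
          simp only [recBest, hx, hr]
          by_cases h1 : p < bp <;> simp [h1]
        | some r =>
          obtain ⟨q, c'⟩ := r
          simp only [recBest, hx, hr]
          by_cases h1 : p < bp <;> by_cases h2 : p ≤ q <;>
              by_cases h3 : q < bp <;> by_cases h4 : q < p <;>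
            simp [h1, h2, h3, h4] <;> omega

theorem recBest_congr (f g : String → Option Int) (l : List String)
    (h : ∀ c ∈ l, f c = g c) : recBest f l = recBest g l := by
  induction l with
  | nil => rfl
  | cons x xs ih =>
    simp only [recBest]
    rw [h x (by simp), ih (fun c hc => h c (by simp [hc]))]

theorem recBest_none (f : String → Option Int) (l : List String)
    (h : ∀ c ∈ l, f c = none) : recBest f l = none := by
  induction l with
  | nil => rfl
  | cons x xs ih =>
    simp only [recBest]
    rw [h x (by simp), ih (fun c hc => h c (by simp [hc]))]

-- in the SUCCESS case at the head position: the min pass returns (i, first matching gdx code)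
theorem recBest_head_hit (codes : List String) (g : String → Option Int) (i : Int)
    (hg : ∀ c p, g c = some p → i + 1 ≤ p) :
    ∀ gdx c₀, gdx.find? (fun c => codes.contains c) = some c₀ →
      recBest (fun c => if c ∈ codes then some i else g c) gdx = some (i, c₀) := by
  intro gdx
  induction gdx with
  | nil => intro c₀ h; simp at h
  | cons x xs ih =>
    intro c₀ hfind
    simp only [recBest]
    by_cases hx : x ∈ codes
    · have hx0 : x = c₀ := by simp [List.find?_cons, hx] at hfind; exact hfind
      subst hx0
      simp only [hx, if_true]
      cases hr : recBest (fun c => if c ∈ codes then some i else g c) xs with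
      | none => rfl
      | some r =>
        obtain ⟨q, c'⟩ := r
        have hq : (if c' ∈ codes then some i else g c') = some q := recBest_mem _ _ _ _ hr
        have hiq : i ≤ q := by
          by_cases hc' : c' ∈ codes
          · simp [hc'] at hq; omega
          · simp [hc'] at hq; have := hg c' q hq; omega
        simp [hiq]
    · have hfind' : xs.find? (fun c => codes.contains c) = some c₀ := by
        simpa [List.find?_cons, hx] using hfind
      rw [ih c₀ hfind']
      simp only [hx, if_false]
      cases hgx : g x with
      | none => rfl
      | some p =>
        have := hg x p hgx
        simp [show ¬ p ≤ i by omega]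

-- A's loop equals rendering the min pass over firstPos
theorem loopA_eq (gdx : List String) (ddx : List (String × (List (String × List (String × List String))))) (i : Int) :
    snomedLoopA gdx ddx i =
      (match recBest (firstPos ddx i) gdx with
       | some (p, c) => mkSuccess p c
       | none => mkFailed gdx) := by
  induction ddx generalizing i with
  | nil =>
    rw [recBest_none (firstPos [] i) gdx (fun c _ => rfl)]
    rfl
  | cons d rest ih =>
    obtain ⟨name, info⟩ := d
    simp only [snomedLoopA]
    cases hfind : gdx.find? (fun c => (getSnomed info).contains c) with
    | some c₀ =>
      have hrb := recBest_head_hit (getSnomed info) (firstPos rest (i + 1)) i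
        (fun c p h => firstPos_ge rest (i + 1) p c h) gdx c₀ hfind
      have heq : recBest (firstPos ((name, info) :: rest) i) gdx = some (i, c₀) := by
        rw [recBest_congr (firstPos ((name, info) :: rest) i)
          (fun c => if c ∈ getSnomed info then some i else firstPos rest (i + 1) c) gdx
          (fun c _ => rfl)]
        exact hrb
      rw [heq]
    | none =>
      rw [ih (i + 1)]
      have heq : recBest (firstPos ((name, info) :: rest) i) gdx = recBest (firstPos rest (i + 1)) gdx := by
        apply recBest_congr
        intro c hc
        have hcn : c ∉ getSnomed info := by
          have := List.find?_eq_none.mp hfind c hc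
          simpa using this
        simp [firstPos, hcn]
      rw [heq]

theorem bestFold_eq_recBest (idx : PySem.Dict String Int) (gdx : List String) :
    bestFold idx gdx = recBest (fun c => idx.get? c) gdx := by
  unfold bestFold
  rw [foldl_recBest (fun c => idx.get? c) gdx none]

-- ===== VERDICT (by name: the statement is the Claim_ definition above) =====
theorem evaluate_snomed_match_py_spec : Claim_equal_evaluate_snomed_match_py := by
  intro gdx_name gdx_info ddx_list _
  unfold Spec_evaluate_snomed_match_py evaluate_snomed_match_py evaluate_snomed_match_py_alt
  by_cases h : (getSnomed gdx_info).isEmpty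
  · simp [h]
  · simp only [h, if_false]
    rw [loopA_eq, bestFold_eq_recBest,
      recBest_congr (fun c => (buildIndex ddx_list).get? c) (firstPos ddx_list 1) _
        (fun c _ => buildIndex_get ddx_list c)]
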